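-- pv_equiv track=rewrite | github.com/dawnyoung/LeetCode | 506-RelativeRanks.py | findRelativeRanks2
-- ===== SOURCE A (Python) =====
-- def findRelativeRanks2(nums):
--     scores = sorted(nums, reverse = True)
--     rank = []
--     for i in range(len(nums)):
--         rank.append(str(scores.index(nums[i])+1))
--         if scores.index(nums[i]) == 0:
--             rank[i] = 'Gold Medal'
--         if scores.index(nums[i]) == 1:
--             rank[i] = 'Silver Medal'
--         if scores.index(nums[i]) == 2:
--             rank[i] = 'Bronze Medal'
--
--     return rank
-- ===== SOURCE B (Python) =====
-- def findRelativeRanks2(nums):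
--     # For each score, its rank is 1 + the number of strictly greater scores;
--     # no sorting, one counting pass per element.
--     rank = []
--     for num in nums:
--         cnt = sum(1 for x in nums if x > num)
--         if cnt == 0:
--             rank.append('Gold Medal')
--         elif cnt == 1:
--             rank.append('Silver Medal')
--         elif cnt == 2:
--             rank.append('Bronze Medal')
--         else:
--             rank.append(str(cnt + 1))
--     return rank
-- ===== Notes on version B (the rewrite author's own statement) =====
-- stated objective: simpler
-- what changed: Replaces sort-then-scores.index lookup by directly counting, for each element, the scores strictly greater than it (that count equals A's first-occurrence index in the descending sort, so ties agree).
import Mathlib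
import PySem

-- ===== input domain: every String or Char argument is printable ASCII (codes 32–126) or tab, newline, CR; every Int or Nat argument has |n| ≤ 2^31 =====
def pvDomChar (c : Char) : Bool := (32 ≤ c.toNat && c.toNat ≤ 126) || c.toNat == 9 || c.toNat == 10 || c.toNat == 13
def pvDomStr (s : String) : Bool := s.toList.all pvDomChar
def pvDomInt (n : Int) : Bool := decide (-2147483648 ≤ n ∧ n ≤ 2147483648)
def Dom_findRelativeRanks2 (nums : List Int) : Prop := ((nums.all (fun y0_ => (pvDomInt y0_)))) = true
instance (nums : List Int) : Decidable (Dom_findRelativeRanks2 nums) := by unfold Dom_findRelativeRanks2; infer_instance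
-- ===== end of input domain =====

-- B replaces A's sort + repeated scores.index lookups by counting, per element, the
-- strictly greater scores (simpler: no sort, one plain counting pass per element).

-- ===== PORT A =====
-- literal port of A: sort descending, then for each index i append str(index+1)
-- and overwrite rank[i] with a medal when the index is 0/1/2.
-- scores.index never raises here (nums[i] ∈ scores), so .getD 0 is exact.
def findRelativeRanks2 (nums : List Int) : List String :=
  let scores := PySem.List.sorted nums (fun x => x) true
  (PySem.List.pyRange 0 (nums.length : Int) 1).foldl
    (fun rank i =>
      let v := PySem.List.pyGetD nums i 0
      let idx : Nat := (PySem.List.index? scores v).getD 0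
      let rank := rank ++ [PySem.Int.toStr ((idx : Int) + 1)]
      let rank := if idx = 0 then rank.set i.toNat "Gold Medal" else rank
      let rank := if idx = 1 then rank.set i.toNat "Silver Medal" else rank
      if idx = 2 then rank.set i.toNat "Bronze Medal" else rank)
    []

-- ===== PORT B =====
-- literal port of Source B: sum(1 for x in nums if x > num) is List.countP.
def findRelativeRanks2_alt (nums : List Int) : List String :=
  nums.map (fun num =>
    let cnt := nums.countP (fun x => decide (num < x))
    if cnt = 0 then "Gold Medal"
    else if cnt = 1 then "Silver Medal"
    else if cnt = 2 then "Bronze Medal"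
    else PySem.Int.toStr ((cnt : Int) + 1))

-- ===== PRECONDITION & SPEC =====
def Spec_findRelativeRanks2 (nums : List Int) (out : List String) : Prop := out = findRelativeRanks2_alt nums
instance (nums : List Int) (out : List String) : Decidable (Spec_findRelativeRanks2 nums out) := by unfold Spec_findRelativeRanks2; infer_instance

-- ===== CLAIM (what is proved, stated in full; the proofs are below) =====
def Claim_equal_findRelativeRanks2 : Prop := ∀ (nums : List Int), Dom_findRelativeRanks2 nums → Spec_findRelativeRanks2 nums (findRelativeRanks2 nums)

-- ===== LEMMAS AND PROOFS =====

-- the label A assigns from the (0-based) rank index k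
def pvLabel (k : Nat) : String :=
  if k = 0 then "Gold Medal"
  else if k = 1 then "Silver Medal"
  else if k = 2 then "Bronze Medal"
  else PySem.Int.toStr ((k : Int) + 1)

-- setting the element just appended
theorem pv_set_append_last (l : List String) (s t : String) :
    (l ++ [s]).set l.length t = l ++ [t] := by
  induction l with
  | nil => rfl
  | cons x xs ih => simp [ih]

-- in the descending sort, the first-occurrence index of v ∈ nums is the number of
-- elements of nums strictly greater than v
theorem pv_index_eq_count (nums : List Int) (v : Int) (hv : v ∈ nums) :
    (PySem.List.index? (PySem.List.sorted nums (fun x => x) true) v).getD 0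
      = nums.countP (fun x => decide (v < x)) := by
  set s := PySem.List.sorted nums (fun x => x) true with hs
  have hvs : v ∈ s := (PySem.List.mem_sorted _ _ _ _).2 hv
  have hsome : (PySem.List.index? s v).isSome :=
    (PySem.List.index?_isSome_iff _ _).2 hvs
  obtain ⟨k, hk⟩ := Option.isSome_iff_exists.1 hsome
  obtain ⟨pre, suf, hsplit, hlen, hnotin⟩ := (PySem.List.index?_eq_some_iff _ _ _).1 hk
  have hperm : s.Perm nums := PySem.List.sorted_perm nums (fun x => x) true
  have hpw : s.Pairwise (fun a b => (fun x => x) b ≤ (fun x => x) a) :=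
    PySem.List.sorted_pairwise_rev nums (fun x => x)
  rw [hk]
  simp only [Option.getD_some]
  rw [← hperm.countP_eq, hsplit, List.countP_append]
  rw [hsplit, List.pairwise_append] at hpw
  have hpre : ∀ a ∈ pre, v < a := by
    intro a ha
    have hle : v ≤ a := hpw.2.2 a ha v (List.mem_cons_self ..)
    rcases lt_or_eq_of_le hle with h | h
    · exact h
    · exact absurd (h ▸ ha) hnotin
  have hsuf : ∀ b ∈ suf, b ≤ v := by
    intro b hb
    exact (List.pairwise_cons.1 hpw.2.1).1 b hb
  have h1 : pre.countP (fun x => decide (v < x)) = pre.length := by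
    rw [List.countP_eq_length]
    intro a ha; simpa using hpre a ha
  have h2 : (v :: suf).countP (fun x => decide (v < x)) = 0 := by
    rw [List.countP_eq_zero]
    intro b hb
    rcases List.mem_cons.1 hb with h | h
    · simp [h]
    · simpa using not_lt.2 (hsuf b h)
  rw [h1, h2]
  omega

-- A's loop, run over range(n), produces the labels of the first n elements
theorem pv_loopA (nums : List Int) (n : Nat) (hn : n ≤ nums.length) :
    (PySem.List.pyRange 0 (n : Int) 1).foldl
      (fun rank i =>
        let v := PySem.List.pyGetD nums i 0
        let idx : Nat := (PySem.List.index? (PySem.List.sorted nums (fun x => x) true) v).getD 0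
        let rank := rank ++ [PySem.Int.toStr ((idx : Int) + 1)]
        let rank := if idx = 0 then rank.set i.toNat "Gold Medal" else rank
        let rank := if idx = 1 then rank.set i.toNat "Silver Medal" else rank
        if idx = 2 then rank.set i.toNat "Bronze Medal" else rank)
      []
    = (nums.take n).map (fun v =>
        pvLabel ((PySem.List.index? (PySem.List.sorted nums (fun x => x) true) v).getD 0)) := by
  induction n with
  | zero => simp [PySem.List.pyRange_one_eq_nil]
  | succ m ih =>
    have hm : m ≤ nums.length := Nat.le_of_succ_le hn
    have hsplit : PySem.List.pyRange 0 ((m : Int) + 1) 1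
        = PySem.List.pyRange 0 (m : Int) 1 ++ [(m : Int)] :=
      PySem.List.pyRange_one_succ_right (Int.natCast_nonneg m)
    have hcast : ((m + 1 : Nat) : Int) = (m : Int) + 1 := by push_cast; ring
    rw [hcast, hsplit, List.foldl_append, ih hm]
    have hmlt : m < nums.length := hn
    have hv : PySem.List.pyGetD nums ((m : Int)) 0 = nums[m] := by
      simp [PySem.List.pyGetD_natCast, List.getD_eq_getElem?_getD, hmlt]
    have hlenmap : ((nums.take m).map (fun v =>
        pvLabel ((PySem.List.index? (PySem.List.sorted nums (fun x => x) true) v).getD 0))).length = m := by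
      simp [Nat.min_eq_left hm]
    have htake : nums.take (m + 1) = nums.take m ++ [nums[m]] :=
      List.take_succ_eq_append_getElem hmlt
    rw [htake, List.map_append, List.map_cons, List.map_nil]
    simp only [List.foldl_cons, List.foldl_nil, hv]
    set L := (nums.take m).map (fun v =>
        pvLabel ((PySem.List.index? (PySem.List.sorted nums (fun x => x) true) v).getD 0)) with hL
    set k := (PySem.List.index? (PySem.List.sorted nums (fun x => x) true) nums[m]).getD 0 with hkdef
    have hset : ∀ s t : String, (L ++ [s]).set m t = L ++ [t] := by
      intro s t
      rw [← hlenmap, pv_set_append_last]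
    by_cases h0 : k = 0
    · simp [h0, hset, pvLabel]
    · by_cases h1 : k = 1
      · simp [h1, hset, pvLabel]
      · by_cases h2 : k = 2
        · simp [h2, hset, pvLabel]
        · simp [h0, h1, h2, pvLabel]

-- ===== VERDICT (by name: the statement is the Claim_ definition above) =====
theorem findRelativeRanks2_spec : Claim_equal_findRelativeRanks2 := by
  intro nums _
  unfold Spec_findRelativeRanks2 findRelativeRanks2 findRelativeRanks2_alt
  rw [pv_loopA nums nums.length le_rfl, List.take_length]
  apply List.map_congr_left
  intro v hv
  rw [pv_index_eq_count nums v hv]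
  simp [pvLabel]
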